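-- pv_equiv track=rewrite | github.com/sourcegraph/CodeContextBench | scripts/integrate_answer_json_wave2.py | find_insertion_point
-- ===== SOURCE A (Python) =====
-- def find_insertion_point(lines):
--     """Find where to insert source block — after sg_only line or after set -e."""
--     sg_only_idx = None
--     set_e_idx = None
--
--     for i, line in enumerate(lines):
--         if "sg_only_mode" in line and "sgonly_verifier_wrapper" in line:
--             sg_only_idx = i
--         if line.strip() in ("set -e", "set -euo pipefail", "set -uo pipefail"):
--             set_e_idx = i
--
--     if sg_only_idx is not None:
--         return sg_only_idx + 1
--     elif set_e_idx is not None: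
--         return set_e_idx + 1
--     return 2  # fallback
-- ===== SOURCE B (Python) =====
-- def find_insertion_point(lines):
--     """Find where to insert source block — after sg_only line or after set -e."""
--     set_e_idx = None
--     for i in range(len(lines) - 1, -1, -1):
--         line = lines[i]
--         if "sg_only_mode" in line and "sgonly_verifier_wrapper" in line:
--             return i + 1
--         if set_e_idx is None and line.strip() in ("set -e", "set -euo pipefail", "set -uo pipefail"):
--             set_e_idx = i
--     return set_e_idx + 1 if set_e_idx is not None else 2
-- ===== Notes on version B (the rewrite author's own statement) =====
-- stated objective: alternative
-- what changed: B scans the lines in reverse with an early return on the first (i.e. forward-last) sg_only match and records the first reverse (forward-last) set-e line once, instead of A's full forward pass that keeps overwriting two index variables.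
import Mathlib
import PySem

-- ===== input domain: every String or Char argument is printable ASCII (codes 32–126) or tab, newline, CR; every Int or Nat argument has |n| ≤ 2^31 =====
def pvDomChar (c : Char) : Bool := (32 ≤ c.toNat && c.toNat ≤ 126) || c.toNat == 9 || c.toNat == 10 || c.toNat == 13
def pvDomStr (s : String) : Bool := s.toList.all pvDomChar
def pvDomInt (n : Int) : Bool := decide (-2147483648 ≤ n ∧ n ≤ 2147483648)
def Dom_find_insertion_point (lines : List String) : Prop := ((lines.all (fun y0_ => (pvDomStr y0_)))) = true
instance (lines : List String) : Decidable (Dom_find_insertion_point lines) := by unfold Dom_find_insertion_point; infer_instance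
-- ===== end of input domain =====

-- B scans the lines in reverse with an early return at the first (forward-last) sg_only match,
-- recording the forward-last set-e line once, instead of A's full forward overwrite pass. Alternative decomposition, same cost.


-- "sg_only_mode" in line and "sgonly_verifier_wrapper" in line
def fipIsSgOnly (line : String) : Bool :=
  PySem.Str.isIn "sg_only_mode" line && PySem.Str.isIn "sgonly_verifier_wrapper" line

-- line.strip() in ("set -e", "set -euo pipefail", "set -uo pipefail")
def fipIsSetE (line : String) : Bool :=
  PySem.Str.strip line == "set -e" || PySem.Str.strip line == "set -euo pipefail" ||
    PySem.Str.strip line == "set -uo pipefail"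

-- ===== PORT A =====
-- forward loop over enumerate(lines), overwriting the two optional indices
def find_insertion_point (lines : List String) : Int :=
  let st := (PySem.List.enumerate lines 0).foldl
    (fun (st : Option Int × Option Int) p =>
      let st1 := if fipIsSgOnly p.2 then (some p.1, st.2) else st
      if fipIsSetE p.2 then (st1.1, some p.1) else st1)
    (none, none)
  match st.1 with
  | some i => i + 1
  | none =>
    match st.2 with
    | some i => i + 1
    | none => 2

-- ===== PORT B =====
-- reverse loop over the indexed lines: early return on the first sg_only hit,
-- record the first set-e hit once in acc; fallback after the loop
def fip_go : List (Int × String) → Option Int → Int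
  | [], acc =>
    match acc with
    | some j => j + 1
    | none => 2
  | (i, line) :: rest, acc =>
    if fipIsSgOnly line then i + 1
    else fip_go rest (if acc.isNone && fipIsSetE line then some i else acc)

def find_insertion_point_alt (lines : List String) : Int :=
  fip_go (PySem.List.enumerate lines 0).reverse none

-- ===== PRECONDITION & SPEC =====
def Spec_find_insertion_point (lines : List String) (out : Int) : Prop := out = find_insertion_point_alt lines
instance (lines : List String) (out : Int) : Decidable (Spec_find_insertion_point lines out) := by unfold Spec_find_insertion_point; infer_instance

-- ===== CLAIM (what is proved, stated in full; the proofs are below) =====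
def Claim_equal_find_insertion_point : Prop := ∀ (lines : List String), Dom_find_insertion_point lines → Spec_find_insertion_point lines (find_insertion_point lines)

-- ===== LEMMAS AND PROOFS =====

-- the last index whose line satisfies b (as A's forward fold computes it)
def fipLast (b : String → Bool) (l : List (Int × String)) (s : Option Int) : Option Int :=
  l.foldl (fun s p => if b p.2 then some p.1 else s) s

-- A's combined fold is the product of the two single fold
theorem fip_foldAB (l : List (Int × String)) (s e : Option Int) :
    l.foldl
      (fun (st : Option Int × Option Int) p =>
        let st1 := if fipIsSgOnly p.2 then (some p.1, st.2) else st
        if fipIsSetE p.2 then (st1.1, some p.1) else st1)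
      (s, e) = (fipLast fipIsSgOnly l s, fipLast fipIsSetE l e) := by
  induction l generalizing s e with
  | nil => rfl
  | cons p rest ih =>
    simp only [List.foldl_cons, fipLast]
    by_cases h1 : fipIsSgOnly p.2 <;> by_cases h2 : fipIsSetE p.2 <;>
      simp [h1, h2, ih, fipLast]

theorem fipLast_append (b : String → Bool) (l : List (Int × String)) (p : Int × String)
    (s : Option Int) :
    fipLast b (l ++ [p]) s = if b p.2 then some p.1 else fipLast b l s := by
  simp [fipLast]

-- B's reverse loop computes the same value as the forward "last match" folds
theorem fip_go_eq (r : List (Int × String)) (acc : Option Int) :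
    fip_go r acc =
      match fipLast fipIsSgOnly r.reverse none with
      | some i => i + 1
      | none =>
        match acc with
        | some j => j + 1
        | none =>
          match fipLast fipIsSetE r.reverse none with
          | some i => i + 1
          | none => 2 := by
  induction r generalizing acc with
  | nil => cases acc <;> rfl
  | cons p rest ih =>
    obtain ⟨i, line⟩ := p
    simp only [List.reverse_cons, fipLast_append, fip_go]
    by_cases h1 : fipIsSgOnly line
    · simp [h1]
    · by_cases h2 : fipIsSetE line
      · cases acc <;> simp [h1, h2, ih]
      · cases acc <;> simp [h1, h2, ih]

-- ===== VERDICT (by name: the statement is the Claim_ definition above) =====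
theorem find_insertion_point_spec : Claim_equal_find_insertion_point := by
  intro lines _
  show find_insertion_point lines = find_insertion_point_alt lines
  rw [find_insertion_point, find_insertion_point_alt, fip_go_eq, List.reverse_reverse,
    fip_foldAB]
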